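-- pv_equiv track=rewrite | github.com/RohdeK/adventofcode | archive/y2023/puzzles/day_19/solution_part_2.py | remove_box
-- ===== SOURCE A (Python) =====
-- from typing import List, Tuple
--
-- BoxType = Tuple[Tuple[int, int], Tuple[int, int], Tuple[int, int], Tuple[int, int]]
--
-- def calc_box_size(box: BoxType) -> int:
--     return (
--         (box[0][1] - box[0][0] + 1)
--         * (box[1][1] - box[1][0] + 1)
--         * (box[2][1] - box[2][0] + 1)
--         * (box[3][1] - box[3][0] + 1)
--     )
--
-- def remove_box(
--     curr_boxes: List[BoxType], to_remove: BoxType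
-- ) -> Tuple[List[BoxType], List[BoxType]]:
--     remaining_boxes = []
--     removed_parts = []
--
--     for box in curr_boxes:
--         box_size = calc_box_size(box)
--
--         x_overlap = (max(box[0][0], to_remove[0][0]), min(box[0][1], to_remove[0][1]))
--         m_overlap = (max(box[1][0], to_remove[1][0]), min(box[1][1], to_remove[1][1]))
--         a_overlap = (max(box[2][0], to_remove[2][0]), min(box[2][1], to_remove[2][1]))
--         s_overlap = (max(box[3][0], to_remove[3][0]), min(box[3][1], to_remove[3][1]))
--
--         if (
--             x_overlap[0] > x_overlap[1]
--             or m_overlap[0] > m_overlap[1]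
--             or a_overlap[0] > a_overlap[1]
--             or s_overlap[0] > s_overlap[1]
--         ):
--             remaining_boxes.append(box)
--             continue
--
--         removed_size = calc_box_size((x_overlap, m_overlap, a_overlap, s_overlap))
--         removed_parts.append((x_overlap, m_overlap, a_overlap, s_overlap))
--
--         kept_size = 0
--
--         x_keep = [
--             (box[0][0], min(to_remove[0][0] - 1, box[0][1])),
--             (max(to_remove[0][1] + 1, box[0][0]), box[0][1]),
--         ]
--         x_keep = [x for x in x_keep if x[0] <= x[1]]
--
--         for x_box in x_keep:
--             kept_size += calc_box_size((x_box, box[1], box[2], box[3]))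
--             remaining_boxes.append((x_box, box[1], box[2], box[3]))
--
--         m_keep = [
--             (box[1][0], min(to_remove[1][0] - 1, box[1][1])),
--             (max(to_remove[1][1] + 1, box[1][0]), box[1][1]),
--         ]
--         m_keep = [m for m in m_keep if m[0] <= m[1]]
--
--         for m_box in m_keep:
--             kept_size += calc_box_size((x_overlap, m_box, box[2], box[3]))
--             remaining_boxes.append((x_overlap, m_box, box[2], box[3]))
--
--         a_keep = [
--             (box[2][0], min(to_remove[2][0] - 1, box[2][1])),
--             (max(to_remove[2][1] + 1, box[2][0]), box[2][1]),
--         ]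
--         a_keep = [a for a in a_keep if a[0] <= a[1]]
--
--         for a_box in a_keep:
--             kept_size += calc_box_size((x_overlap, m_overlap, a_box, box[3]))
--             remaining_boxes.append((x_overlap, m_overlap, a_box, box[3]))
--
--         s_keep = [
--             (box[3][0], min(to_remove[3][0] - 1, box[3][1])),
--             (max(to_remove[3][1] + 1, box[3][0]), box[3][1]),
--         ]
--         s_keep = [s for s in s_keep if s[0] <= s[1]]
--
--         for s_box in s_keep:
--             kept_size += calc_box_size((x_overlap, m_overlap, a_overlap, s_box))
--             remaining_boxes.append((x_overlap, m_overlap, a_overlap, s_box))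
--
--         assert kept_size + removed_size == box_size
--
--     return remaining_boxes, removed_parts
-- ===== SOURCE B (Python) =====
-- # B: same 4D box subtraction, but the four copy-pasted axis blocks become one
-- # recursive split over the dimension list with an overlap prefix.
--
-- def _split(box, rem, ov):
--     """All kept slabs of `box` after cutting out `rem`, as lists of intervals:
--     slabs for the first dimension (overlap not yet applied), then deeper slabs
--     prefixed with this dimension's overlap interval."""
--     if not box:
--         return []
--     (bl, bh), (rl, rh) = box[0], rem[0]
--     pieces = [[s] + box[1:]
--               for s in ((bl, min(rl - 1, bh)), (max(rh + 1, bl), bh))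
--               if s[0] <= s[1]]
--     return pieces + [[ov[0]] + p for p in _split(box[1:], rem[1:], ov[1:])]
--
-- def remove_box(curr_boxes, to_remove):
--     rem = list(to_remove)
--     remaining, removed = [], []
--     for box in curr_boxes:
--         ov = [(max(b[0], r[0]), min(b[1], r[1])) for b, r in zip(box, rem)]
--         if any(lo > hi for lo, hi in ov):
--             remaining.append(box)
--             continue
--         removed.append(tuple(ov))
--         remaining.extend(tuple(p) for p in _split(list(box), rem, ov))
--     return remaining, removed
-- ===== Notes on version B (the rewrite author's own statement) =====
-- stated objective: simpler
-- what changed: The four copy-pasted per-axis keep-slice blocks are replaced by one recursive split over the list of dimensions that threads the overlap prefix, and the assert-only size bookkeeping is dropped.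
import Mathlib
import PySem

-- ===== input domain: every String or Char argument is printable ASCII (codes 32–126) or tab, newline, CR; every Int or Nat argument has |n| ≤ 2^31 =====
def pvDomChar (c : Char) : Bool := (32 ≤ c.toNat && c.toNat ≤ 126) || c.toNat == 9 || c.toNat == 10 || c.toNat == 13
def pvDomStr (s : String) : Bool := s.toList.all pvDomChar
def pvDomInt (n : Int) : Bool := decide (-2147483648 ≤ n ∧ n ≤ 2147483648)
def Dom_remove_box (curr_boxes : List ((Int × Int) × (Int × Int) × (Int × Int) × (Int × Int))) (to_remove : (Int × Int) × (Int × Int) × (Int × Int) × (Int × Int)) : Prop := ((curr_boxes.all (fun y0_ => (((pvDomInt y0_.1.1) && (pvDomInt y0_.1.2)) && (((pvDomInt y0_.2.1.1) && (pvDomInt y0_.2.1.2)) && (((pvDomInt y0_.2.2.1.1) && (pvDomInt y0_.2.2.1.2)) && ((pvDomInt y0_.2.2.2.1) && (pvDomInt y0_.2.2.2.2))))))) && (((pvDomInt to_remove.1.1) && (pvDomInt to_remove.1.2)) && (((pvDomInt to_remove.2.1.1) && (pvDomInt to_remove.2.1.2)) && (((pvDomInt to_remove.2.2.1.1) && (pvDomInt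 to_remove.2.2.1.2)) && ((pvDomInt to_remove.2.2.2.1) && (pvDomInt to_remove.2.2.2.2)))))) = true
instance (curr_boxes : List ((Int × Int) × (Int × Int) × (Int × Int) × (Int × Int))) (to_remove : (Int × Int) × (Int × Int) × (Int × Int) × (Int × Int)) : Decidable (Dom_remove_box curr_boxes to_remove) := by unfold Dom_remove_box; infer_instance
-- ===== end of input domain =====

-- B replaces A's four copy-pasted per-axis blocks by one recursive split over the dimension list (objective: simpler).

-- ===== PORT A =====

def calc_box_size (box : (Int × Int) × (Int × Int) × (Int × Int) × (Int × Int)) : Int :=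
  (box.1.2 - box.1.1 + 1) * (box.2.1.2 - box.2.1.1 + 1) *
    (box.2.2.1.2 - box.2.2.1.1 + 1) * (box.2.2.2.2 - box.2.2.2.1 + 1)

def remove_box (curr_boxes : List ((Int × Int) × (Int × Int) × (Int × Int) × (Int × Int))) (to_remove : (Int × Int) × (Int × Int) × (Int × Int) × (Int × Int)) : (List ((Int × Int) × (Int × Int) × (Int × Int) × (Int × Int))) × (List ((Int × Int) × (Int × Int) × (Int × Int) × (Int × Int))) :=
  curr_boxes.foldl (fun acc box =>
    let remaining_boxes := acc.1
    let removed_parts := acc.2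
    let _box_size := calc_box_size box
    let x_overlap : Int × Int := (max box.1.1 to_remove.1.1, min box.1.2 to_remove.1.2)
    let m_overlap : Int × Int := (max box.2.1.1 to_remove.2.1.1, min box.2.1.2 to_remove.2.1.2)
    let a_overlap : Int × Int := (max box.2.2.1.1 to_remove.2.2.1.1, min box.2.2.1.2 to_remove.2.2.1.2)
    let s_overlap : Int × Int := (max box.2.2.2.1 to_remove.2.2.2.1, min box.2.2.2.2 to_remove.2.2.2.2)
    if x_overlap.1 > x_overlap.2 ∨ m_overlap.1 > m_overlap.2 ∨
        a_overlap.1 > a_overlap.2 ∨ s_overlap.1 > s_overlap.2 then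
      (remaining_boxes ++ [box], removed_parts)
    else
      let _removed_size := calc_box_size (x_overlap, m_overlap, a_overlap, s_overlap)
      let removed_parts := removed_parts ++ [(x_overlap, m_overlap, a_overlap, s_overlap)]
      -- Python also accumulates kept_size solely to feed an assert; that bookkeeping does not affect the returned value and is not modelled
      let x_keep := ([(box.1.1, min (to_remove.1.1 - 1) box.1.2),
                      (max (to_remove.1.2 + 1) box.1.1, box.1.2)].filter (fun x => x.1 ≤ x.2))
      let remaining_boxes := x_keep.foldl (fun r x_box =>
        r ++ [(x_box, box.2.1, box.2.2.1, box.2.2.2)]) remaining_boxes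
      let m_keep := ([(box.2.1.1, min (to_remove.2.1.1 - 1) box.2.1.2),
                      (max (to_remove.2.1.2 + 1) box.2.1.1, box.2.1.2)].filter (fun m => m.1 ≤ m.2))
      let remaining_boxes := m_keep.foldl (fun r m_box =>
        r ++ [(x_overlap, m_box, box.2.2.1, box.2.2.2)]) remaining_boxes
      let a_keep := ([(box.2.2.1.1, min (to_remove.2.2.1.1 - 1) box.2.2.1.2),
                      (max (to_remove.2.2.1.2 + 1) box.2.2.1.1, box.2.2.1.2)].filter (fun a => a.1 ≤ a.2))
      let remaining_boxes := a_keep.foldl (fun r a_box =>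
        r ++ [(x_overlap, m_overlap, a_box, box.2.2.2)]) remaining_boxes
      let s_keep := ([(box.2.2.2.1, min (to_remove.2.2.2.1 - 1) box.2.2.2.2),
                      (max (to_remove.2.2.2.2 + 1) box.2.2.2.1, box.2.2.2.2)].filter (fun s => s.1 ≤ s.2))
      let remaining_boxes := s_keep.foldl (fun r s_box =>
        r ++ [(x_overlap, m_overlap, a_overlap, s_box)]) remaining_boxes
      (remaining_boxes, removed_parts)) ([], [])

-- ===== PORT B =====
-- B: one recursive split over the list of dimensions, with an overlap prefix.

def splitDims : List (Int × Int) → List (Int × Int) → List (Int × Int) → List (List (Int × Int))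
  | [], _, _ => []
  | _, [], _ => []
  | _, _, [] => []
  | (bl, bh) :: bs, (rl, rh) :: rs, ovh :: ovs =>
      (([(bl, min (rl - 1) bh), (max (rh + 1) bl, bh)].filter
          (fun s => s.1 ≤ s.2)).map (fun s => s :: bs))
        ++ (splitDims bs rs ovs).map (fun p => ovh :: p)

def dimsOf (b : (Int × Int) × (Int × Int) × (Int × Int) × (Int × Int)) : List (Int × Int) :=
  [b.1, b.2.1, b.2.2.1, b.2.2.2]

def boxOf : List (Int × Int) → (Int × Int) × (Int × Int) × (Int × Int) × (Int × Int)
  | [p, q, r, s] => (p, q, r, s)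
  | _ => ((0, 0), (0, 0), (0, 0), (0, 0))

def remove_box_alt (curr_boxes : List ((Int × Int) × (Int × Int) × (Int × Int) × (Int × Int))) (to_remove : (Int × Int) × (Int × Int) × (Int × Int) × (Int × Int)) : (List ((Int × Int) × (Int × Int) × (Int × Int) × (Int × Int))) × (List ((Int × Int) × (Int × Int) × (Int × Int) × (Int × Int))) :=
  let rem := dimsOf to_remove
  curr_boxes.foldl (fun acc box =>
    let ov := (List.zip (dimsOf box) rem).map (fun br => (max br.1.1 br.2.1, min br.1.2 br.2.2))
    if ov.any (fun p => p.1 > p.2) then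
      (acc.1 ++ [box], acc.2)
    else
      (acc.1 ++ (splitDims (dimsOf box) rem ov).map boxOf, acc.2 ++ [boxOf ov])) ([], [])

-- ===== PRECONDITION & SPEC =====
def Spec_remove_box (curr_boxes : List ((Int × Int) × (Int × Int) × (Int × Int) × (Int × Int))) (to_remove : (Int × Int) × (Int × Int) × (Int × Int) × (Int × Int)) (out : (List ((Int × Int) × (Int × Int) × (Int × Int) × (Int × Int))) × (List ((Int × Int) × (Int × Int) × (Int × Int) × (Int × Int)))) : Prop := out = remove_box_alt curr_boxes to_remove
instance (curr_boxes : List ((Int × Int) × (Int × Int) × (Int × Int) × (Int × Int))) (to_remove : (Int × Int) × (Int × Int) × (Int × Int) × (Int × Int)) (out : (List ((Int × Int) × (Int × Int) × (Int × Int) × (Int × Int))) × (List ((Int × Int) × (Int × Int) × (Int × Int) × (Int × Int)))) : Decidable (Spec_remove_box curr_boxes to_remove out) := by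
  unfold Spec_remove_box
  have h1 : DecidableEq ((Int × Int) × (Int × Int) × (Int × Int) × (Int × Int)) := by infer_instance
  have h2 : DecidableEq (List ((Int × Int) × (Int × Int) × (Int × Int) × (Int × Int))) := by infer_instance
  have h3 : DecidableEq (List ((Int × Int) × (Int × Int) × (Int × Int) × (Int × Int)) × List ((Int × Int) × (Int × Int) × (Int × Int) × (Int × Int))) := by infer_instance
  exact h3 out _

-- ===== CLAIM (what is proved, stated in full; the proofs are below) =====
def Claim_equal_remove_box : Prop := ∀ (curr_boxes : List ((Int × Int) × (Int × Int) × (Int × Int) × (Int × Int))) (to_remove : (Int × Int) × (Int × Int) × (Int × Int) × (Int × Int)), Dom_remove_box curr_boxes to_remove → Spec_remove_box curr_boxes to_remove (remove_box curr_boxes to_remove)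

-- ===== LEMMAS AND PROOFS =====

-- ===== VERDICT (by name: the statement is the Claim_ definition above) =====
-- foldl that appends one element per iteration is init ++ map
lemma foldl_push {A B : Type} (f : A → B) :
    ∀ (l : List A) (init : List B),
      l.foldl (fun r x => r ++ [f x]) init = init ++ l.map f := by
  intro l
  induction l with
  | nil => simp
  | cons a t ih => intro init; simp [ih]

theorem remove_box_spec : Claim_equal_remove_box := by
  intro curr_boxes to_remove _
  show remove_box curr_boxes to_remove = remove_box_alt curr_boxes to_remove
  unfold remove_box remove_box_alt
  congr 1
  funext acc box
  simp only [dimsOf, List.zip_cons_cons, List.zip_nil_right, List.map_cons, List.map_nil, List.any_cons, List.any_nil,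
    Bool.or_eq_true, Bool.or_false, decide_eq_true_eq,
    splitDims, List.map_append, List.map_map, boxOf, foldl_push]
  split
  · rfl
  · simp [List.append_assoc, Function.comp_def, boxOf]
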